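-- pv_equiv track=rewrite | github.com/pimenol/BLAST | seeding.py | filter_seeds_two_hit
-- ===== SOURCE A (Python) =====
-- from collections import defaultdict
--
-- def filter_seeds_two_hit(seeds: list, window: int = 40) -> list:
--     """Keep only seeds where two hits fall on the same diagonal within `window` bp.
--     Returns a list of (db_pos, q_pos) representing confirmed seed pairs."""
--     if not seeds:
--         return []
--
--     by_diag = defaultdict(list)
--     for db_pos, q_pos in seeds:
--         by_diag[db_pos - q_pos].append((db_pos, q_pos))
--
--     confirmed = set()
--     for hits in by_diag.values():
--         hits.sort()
--         for i in range(1, len(hits)):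
--             if hits[i][0] - hits[i - 1][0] <= window:
--                 confirmed.add(hits[i - 1])
--                 confirmed.add(hits[i])
--
--     return list(confirmed)
-- ===== SOURCE B (Python) =====
-- def filter_seeds_two_hit(seeds: list, window: int = 40) -> list:
--     """Single global sort by (diagonal, db_pos) followed by one adjacent-pair scan,
--     instead of bucketing into a per-diagonal dict and sorting each bucket."""
--     ordered = sorted(seeds, key=lambda p: (p[0] - p[1], p[0]))
--     confirmed = set()
--     for prev, cur in zip(ordered, ordered[1:]):
--         if prev[0] - prev[1] == cur[0] - cur[1] and cur[0] - prev[0] <= window: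
--             confirmed.add(prev)
--             confirmed.add(cur)
--     return sorted(confirmed)
-- ===== Notes on version B (the rewrite author's own statement) =====
-- stated objective: faster
-- what changed: Replaces the per-diagonal defaultdict bucketing with per-bucket sorts by one global sort keyed on (diagonal, db_pos) followed by a single adjacent-pair scan; the confirmed set is returned in sorted order (A's list(set) order is hash-accidental, the result is compared as a set).
import Mathlib
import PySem

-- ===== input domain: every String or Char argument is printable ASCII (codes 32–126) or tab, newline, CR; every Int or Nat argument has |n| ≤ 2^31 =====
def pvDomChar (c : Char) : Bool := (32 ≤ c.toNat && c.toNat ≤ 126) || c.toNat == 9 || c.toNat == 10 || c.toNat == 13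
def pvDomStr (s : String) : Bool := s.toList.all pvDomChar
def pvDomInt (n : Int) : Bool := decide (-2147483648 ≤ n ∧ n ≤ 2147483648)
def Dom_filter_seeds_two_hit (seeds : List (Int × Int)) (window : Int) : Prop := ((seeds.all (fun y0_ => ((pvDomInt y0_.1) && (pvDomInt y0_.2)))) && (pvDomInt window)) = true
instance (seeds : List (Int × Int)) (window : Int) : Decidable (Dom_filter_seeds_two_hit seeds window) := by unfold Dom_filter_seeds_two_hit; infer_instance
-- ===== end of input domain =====

-- B replaces A's per-diagonal dict bucketing (+ per-bucket sorts) by ONE global sort keyed on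
-- (diagonal, db_pos) and a single adjacent-pair scan; both ports return the confirmed set in
-- sorted order (Python's list(set)/iteration order is hash-based and unmodelled; the task
-- compares the returned list as a set).

-- Python compares int pairs lexicographically: both ports sort with keys into Lex (Int × Int).
def pvKey1 (p : Int × Int) : Lex (Int × Int) := toLex (p.1, p.2)
def pvKey2 (p : Int × Int) : Lex (Int × Int) := toLex (p.1 - p.2, p.1)

-- ===== PORT A =====
def filter_seeds_two_hit (seeds : List (Int × Int)) (window : Int) : List (Int × Int) :=
  if seeds = [] then []
  else
    let by_diag : PySem.Dict Int (List (Int × Int)) :=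
      seeds.foldl (fun d p => d.modify (p.1 - p.2) [] (fun v => v ++ [p])) PySem.Dict.empty
    let confirmed : PySem.Set (Int × Int) :=
      by_diag.values.foldl (fun conf hits =>
        -- hits.sort() orders the (db_pos, q_pos) tuples lexicographically; hits[i] has an
        -- always-in-range index and is ported with pyGetD and a dummy default
        (PySem.List.pyRange 1 (PySem.List.len (PySem.List.sorted hits pvKey1))).foldl (fun conf i =>
          if (PySem.List.pyGetD (PySem.List.sorted hits pvKey1) i (0, 0)).1
              - (PySem.List.pyGetD (PySem.List.sorted hits pvKey1) (i - 1) (0, 0)).1 ≤ window then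
            PySem.Set.add (PySem.Set.add conf (PySem.List.pyGetD (PySem.List.sorted hits pvKey1) (i - 1) (0, 0)))
              (PySem.List.pyGetD (PySem.List.sorted hits pvKey1) i (0, 0))
          else conf) conf) PySem.Set.empty
    -- list(confirmed): the set's hash iteration order is unmodelled, so the set is consumed
    -- in sorted order (the returned list is compared as a set)
    PySem.List.sorted confirmed pvKey1

-- ===== PORT B =====
def filter_seeds_two_hit_alt (seeds : List (Int × Int)) (window : Int) : List (Int × Int) :=
  let ordered := PySem.List.sorted seeds pvKey2      -- sorted(seeds, key=(diag, db_pos))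
  let confirmed : PySem.Set (Int × Int) :=
    (ordered.zip ordered.tail).foldl (fun conf pc =>  -- zip(ordered, ordered[1:])
      if pc.1.1 - pc.1.2 = pc.2.1 - pc.2.2 ∧ pc.2.1 - pc.1.1 ≤ window then
        PySem.Set.add (PySem.Set.add conf pc.1) pc.2
      else conf) PySem.Set.empty
  PySem.List.sorted confirmed pvKey1                  -- sorted(confirmed)

-- ===== PRECONDITION & SPEC =====
def Spec_filter_seeds_two_hit (seeds : List (Int × Int)) (window : Int) (out : List (Int × Int)) : Prop := out = filter_seeds_two_hit_alt seeds window
instance (seeds : List (Int × Int)) (window : Int) (out : List (Int × Int)) : Decidable (Spec_filter_seeds_two_hit seeds window out) := by unfold Spec_filter_seeds_two_hit; infer_instance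

-- ===== CLAIM (what is proved, stated in full; the proofs are below) =====
def Claim_equal_filter_seeds_two_hit : Prop := ∀ (seeds : List (Int × Int)) (window : Int), Dom_filter_seeds_two_hit seeds window → Spec_filter_seeds_two_hit seeds window (filter_seeds_two_hit seeds window)

-- ===== LEMMAS AND PROOFS =====

theorem pvKey1_inj : Function.Injective pvKey1 := by
  intro p q h
  have h' : (p.1, p.2) = (q.1, q.2) := toLex.injective h
  cases p; cases q; simpa using h'

theorem pvKey2_inj : Function.Injective pvKey2 := by
  intro p q h
  have h' : (p.1 - p.2, p.1) = (q.1 - q.2, q.1) := toLex.injective h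
  cases p; cases q
  simp only [Prod.mk.injEq] at h' ⊢
  omega

theorem pv_key1_le_fst {a b : Int × Int} (h : pvKey1 a ≤ pvKey1 b) : a.1 ≤ b.1 := by
  rw [pvKey1, pvKey1, Prod.Lex.le_iff] at h
  simp at h
  omega

theorem pv_key2_le_of_eq_diag {a b : Int × Int} (hd : a.1 - a.2 = b.1 - b.2) (h1 : a.1 ≤ b.1) :
    pvKey2 a ≤ pvKey2 b := by
  rw [pvKey2, pvKey2, Prod.Lex.le_iff]
  simp
  omega

theorem pv_key2_le_of_diag_lt {a b : Int × Int} (hd : a.1 - a.2 < b.1 - b.2) :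
    pvKey2 a ≤ pvKey2 b := by
  rw [pvKey2, pvKey2, Prod.Lex.le_iff]
  simp
  omega

-- membership and Nodup through B's adjacent-pair fold
theorem pv_mem_pairFold (P : (Int × Int) × (Int × Int) → Prop) [DecidablePred P] :
    ∀ (zs : List ((Int × Int) × (Int × Int))) (conf : PySem.Set (Int × Int)) (x : Int × Int),
      (x ∈ zs.foldl (fun c ab => if P ab then PySem.Set.add (PySem.Set.add c ab.1) ab.2 else c) conf ↔
        x ∈ conf ∨ ∃ ab ∈ zs, P ab ∧ (x = ab.1 ∨ x = ab.2))
  | [], conf, x => by simp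
  | a :: zs, conf, x => by
    rw [List.foldl_cons, pv_mem_pairFold P zs]
    by_cases hP : P a
    · simp only [if_pos hP, PySem.Set.mem_add, List.mem_cons]
      constructor
      · rintro (((h | h) | h) | ⟨ab, hab, hPab, hx⟩)
        · exact Or.inl h
        · exact Or.inr ⟨a, Or.inl rfl, hP, Or.inl h⟩
        · exact Or.inr ⟨a, Or.inl rfl, hP, Or.inr h⟩
        · exact Or.inr ⟨ab, Or.inr hab, hPab, hx⟩
      · rintro (h | ⟨ab, (rfl | hab), hPab, hx⟩)
        · exact Or.inl (Or.inl (Or.inl h))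
        · rcases hx with h | h
          · exact Or.inl (Or.inl (Or.inr h))
          · exact Or.inl (Or.inr h)
        · exact Or.inr ⟨ab, hab, hPab, hx⟩
    · simp only [if_neg hP, List.mem_cons]
      constructor
      · rintro (h | ⟨ab, hab, hPab, hx⟩)
        · exact Or.inl h
        · exact Or.inr ⟨ab, Or.inr hab, hPab, hx⟩
      · rintro (h | ⟨ab, (rfl | hab), hPab, hx⟩)
        · exact Or.inl h
        · exact absurd hPab hP
        · exact Or.inr ⟨ab, hab, hPab, hx⟩

theorem pv_nodup_pairFold (P : (Int × Int) × (Int × Int) → Prop) [DecidablePred P] :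
    ∀ (zs : List ((Int × Int) × (Int × Int))) (conf : PySem.Set (Int × Int)), conf.Nodup →
      (zs.foldl (fun c ab => if P ab then PySem.Set.add (PySem.Set.add c ab.1) ab.2 else c) conf).Nodup
  | [], _, h => h
  | a :: zs, conf, h => by
    rw [List.foldl_cons]
    apply pv_nodup_pairFold
    by_cases hP : P a
    · rw [if_pos hP]; exact PySem.Set.nodup_add _ _ (PySem.Set.nodup_add _ _ h)
    · rwa [if_neg hP]

theorem pv_drop_one_zip (hs : List (Int × Int)) :
    List.drop 1 ((((0, 0) : Int × Int) :: hs).zip hs) = hs.zip hs.tail := by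
  cases hs <;> rfl

-- A's index loop over range(1, len(hs)) is the fold over zip(hs, hs[1:])
theorem pv_adjFold_eq (window : Int) (hs : List (Int × Int)) (conf : PySem.Set (Int × Int)) :
    (PySem.List.pyRange 1 (PySem.List.len hs)).foldl (fun conf i =>
        if (PySem.List.pyGetD hs i (0, 0)).1 - (PySem.List.pyGetD hs (i - 1) (0, 0)).1 ≤ window then
          PySem.Set.add (PySem.Set.add conf (PySem.List.pyGetD hs (i - 1) (0, 0)))
            (PySem.List.pyGetD hs i (0, 0))
        else conf) conf
      = (hs.zip hs.tail).foldl (fun conf ab =>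
          if ab.2.1 - ab.1.1 ≤ window then PySem.Set.add (PySem.Set.add conf ab.1) ab.2 else conf) conf := by
  have hzlen : ((((0, 0) : Int × Int) :: hs).zip hs).length = hs.length := by simp
  have hcongr : ∀ (acc : PySem.Set (Int × Int)), ∀ i ∈ PySem.List.pyRange 1 (PySem.List.len hs),
      (fun (conf : PySem.Set (Int × Int)) (i : Int) =>
        if (PySem.List.pyGetD hs i (0, 0)).1 - (PySem.List.pyGetD hs (i - 1) (0, 0)).1 ≤ window then
          PySem.Set.add (PySem.Set.add conf (PySem.List.pyGetD hs (i - 1) (0, 0)))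
            (PySem.List.pyGetD hs i (0, 0))
        else conf) acc i
      = (fun (conf : PySem.Set (Int × Int)) (i : Int) =>
          (fun (conf : PySem.Set (Int × Int)) (ab : (Int × Int) × (Int × Int)) =>
            if ab.2.1 - ab.1.1 ≤ window then PySem.Set.add (PySem.Set.add conf ab.1) ab.2 else conf) conf
            (PySem.List.pyGetD ((((0, 0) : Int × Int) :: hs).zip hs) i ((0, 0), (0, 0)))) acc i := by
    intro acc i hi
    rw [PySem.List.mem_pyRange_one] at hi
    have h2' : i < (hs.length : Int) := by
      have h := hi.2
      simpa [PySem.List.len] using h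
    have hi1 : (1 : Int) ≤ i := hi.1
    have hi0 : (0 : Int) ≤ i := by omega
    have hiN : i.toNat < hs.length := by omega
    obtain ⟨k, hk⟩ : ∃ k, i.toNat = k + 1 := ⟨i.toNat - 1, by omega⟩
    have hkN : k < hs.length := by omega
    have hprev : PySem.List.pyGetD hs (i - 1) (0, 0) = hs[k] := by
      rw [PySem.List.pyGetD_eq_getElem hs (0, 0) (by omega) (by push_cast; omega)]
      congr 1
      omega
    have hcur : PySem.List.pyGetD hs i (0, 0) = hs[i.toNat] :=
      PySem.List.pyGetD_eq_getElem hs (0, 0) hi0 (by push_cast; omega)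
    have hpair : PySem.List.pyGetD ((((0, 0) : Int × Int) :: hs).zip hs) i ((0, 0), (0, 0))
        = (hs[k], hs[i.toNat]) := by
      rw [PySem.List.pyGetD_eq_getElem _ _ hi0 (by rw [hzlen]; push_cast; omega)]
      rw [List.getElem_zip]
      congr 1
      · simp only [hk]
        exact List.getElem_cons_succ ..
    simp only [hpair, hprev, hcur]
  rw [PySem.List.foldl_congr_mem _ _ _ _ hcongr]
  have hlen : PySem.List.len hs = PySem.List.len ((((0, 0) : Int × Int) :: hs).zip hs) := by
    simp [PySem.List.len]
  rw [hlen]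
  refine Eq.trans (PySem.List.foldl_pyRange_pyGetD ((((0, 0) : Int × Int) :: hs).zip hs) ((0, 0), (0, 0))
    (fun conf ab => if ab.2.1 - ab.1.1 ≤ window then PySem.Set.add (PySem.Set.add conf ab.1) ab.2 else conf)
    conf (a := 1) (by norm_num)) ?_
  simp only [Int.toNat_one, pv_drop_one_zip]

-- membership / Nodup through A's outer fold over the dict's bucket lists
theorem pv_mem_outer (window : Int) :
    ∀ (vals : List (List (Int × Int))) (conf : PySem.Set (Int × Int)) (x : Int × Int),
      (x ∈ vals.foldl (fun conf hits =>
          (PySem.List.pyRange 1 (PySem.List.len (PySem.List.sorted hits pvKey1))).foldl (fun conf i =>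
            if (PySem.List.pyGetD (PySem.List.sorted hits pvKey1) i (0, 0)).1
                - (PySem.List.pyGetD (PySem.List.sorted hits pvKey1) (i - 1) (0, 0)).1 ≤ window then
              PySem.Set.add (PySem.Set.add conf (PySem.List.pyGetD (PySem.List.sorted hits pvKey1) (i - 1) (0, 0)))
                (PySem.List.pyGetD (PySem.List.sorted hits pvKey1) i (0, 0))
            else conf) conf) conf
        ↔ x ∈ conf ∨ ∃ hits ∈ vals, ∃ ab ∈ (PySem.List.sorted hits pvKey1).zip (PySem.List.sorted hits pvKey1).tail,
            ab.2.1 - ab.1.1 ≤ window ∧ (x = ab.1 ∨ x = ab.2))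
  | [], conf, x => by simp
  | hits :: vals, conf, x => by
    rw [List.foldl_cons, pv_mem_outer window vals, pv_adjFold_eq window,
      pv_mem_pairFold (fun ab => ab.2.1 - ab.1.1 ≤ window)]
    simp only [List.mem_cons]
    constructor
    · rintro ((h | ⟨ab, hab, hw, hx⟩) | ⟨hits', hh, hrest⟩)
      · exact Or.inl h
      · exact Or.inr ⟨hits, Or.inl rfl, ab, hab, hw, hx⟩
      · exact Or.inr ⟨hits', Or.inr hh, hrest⟩
    · rintro (h | ⟨hits', (rfl | hh), hrest⟩)
      · exact Or.inl (Or.inl h)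
      · obtain ⟨ab, hab, hw, hx⟩ := hrest
        exact Or.inl (Or.inr ⟨ab, hab, hw, hx⟩)
      · exact Or.inr ⟨hits', hh, hrest⟩

theorem pv_nodup_outer (window : Int) :
    ∀ (vals : List (List (Int × Int))) (conf : PySem.Set (Int × Int)), conf.Nodup →
      (vals.foldl (fun conf hits =>
          (PySem.List.pyRange 1 (PySem.List.len (PySem.List.sorted hits pvKey1))).foldl (fun conf i =>
            if (PySem.List.pyGetD (PySem.List.sorted hits pvKey1) i (0, 0)).1
                - (PySem.List.pyGetD (PySem.List.sorted hits pvKey1) (i - 1) (0, 0)).1 ≤ window then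
              PySem.Set.add (PySem.Set.add conf (PySem.List.pyGetD (PySem.List.sorted hits pvKey1) (i - 1) (0, 0)))
                (PySem.List.pyGetD (PySem.List.sorted hits pvKey1) i (0, 0))
            else conf) conf) conf).Nodup
  | [], _, h => h
  | hits :: vals, conf, h => by
    rw [List.foldl_cons]
    apply pv_nodup_outer
    rw [pv_adjFold_eq window]
    exact pv_nodup_pairFold (fun ab => ab.2.1 - ab.1.1 ≤ window) _ conf h

theorem pv_flatMap_congr {α β : Type} (l : List α) (f g : α → List β)
    (h : ∀ a ∈ l, f a = g a) : l.flatMap f = l.flatMap g := by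
  induction l with
  | nil => rfl
  | cons a t ih =>
    rw [List.flatMap_cons, List.flatMap_cons, h a (List.mem_cons_self ..),
      ih (fun b hb => h b (List.mem_cons_of_mem _ hb))]

theorem pv_flatMap_eq_flatten {α β : Type} (l : List α) (f : α → List β) :
    l.flatMap f = (l.map f).flatten := by
  induction l with
  | nil => rfl
  | cons a t ih => rw [List.flatMap_cons, List.map_cons, List.flatten_cons, ih]

-- partitioning a list by its key values, along any duplicate-free covering key order
theorem pv_perm_flatMap_filter (key : Int × Int → Int) :
    ∀ (ds : List Int) (l : List (Int × Int)), ds.Nodup → (∀ p ∈ l, key p ∈ ds) →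
      l.Perm (ds.flatMap (fun d => l.filter (fun p => key p == d)))
  | [], l, _, hcov => by
    have hl : l = [] := List.eq_nil_iff_forall_not_mem.mpr (fun p hp => by simpa using hcov p hp)
    simp [hl]
  | d :: ds, l, hnd, hcov => by
    rw [List.flatMap_cons]
    have hstep : (l.filter (fun p => !(key p == d))).Perm
        (ds.flatMap (fun d' => (l.filter (fun p => !(key p == d))).filter (fun p => key p == d'))) := by
      refine pv_perm_flatMap_filter key ds _ (List.nodup_cons.mp hnd).2 ?_
      intro p hp
      have hm := List.mem_filter.mp hp
      rcases List.mem_cons.mp (hcov p hm.1) with h | h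
      · exfalso; simp [h] at hm
      · exact h
    have hrw : (ds.flatMap (fun d' => (l.filter (fun p => !(key p == d))).filter (fun p => key p == d')))
        = ds.flatMap (fun d' => l.filter (fun p => key p == d')) := by
      refine pv_flatMap_congr ds _ _ ?_
      intro d' hd'
      have hne : d ≠ d' := fun h => (List.nodup_cons.mp hnd).1 (h ▸ hd')
      rw [List.filter_filter]
      refine List.filter_congr ?_
      intro p _
      rcases eq_or_ne (key p) d' with h | h
      · subst h
        simp [Ne.symm hne]
      · simp [h]
    rw [hrw] at hstep
    exact ((List.filter_append_perm (fun p => key p == d) l).symm.trans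
      (List.Perm.append_left _ hstep))

theorem pv_zip_tail_cons (a : Int × Int) (l : List (Int × Int)) :
    (a :: l).zip l = ((l.head?.map (fun b => (a, b))).toList) ++ l.zip l.tail := by
  cases l <;> rfl

theorem pv_zip_tail_append (l₁ l₂ : List (Int × Int)) :
    (l₁ ++ l₂).zip ((l₁ ++ l₂).tail)
      = l₁.zip l₁.tail ++ (((l₁.getLast?.bind (fun a => l₂.head?.map (fun b => (a, b)))).toList)
          ++ l₂.zip l₂.tail) := by
  induction l₁ with
  | nil => simp
  | cons a t ih =>
    cases t with
    | nil =>
      simp only [List.nil_append, List.cons_append, List.tail_cons]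
      rw [pv_zip_tail_cons]
      simp
    | cons b t' =>
      simp only [List.cons_append, List.tail_cons] at ih ⊢
      rw [pv_zip_tail_cons a (b :: (t' ++ l₂)), pv_zip_tail_cons a (b :: t')]
      simp only [List.tail_cons, List.head?_cons, List.getLast?_cons_cons]
      rw [ih]
      simp [List.append_assoc]

theorem pv_mem_zip_tail {l : List (Int × Int)} {ab : (Int × Int) × (Int × Int)}
    (h : ab ∈ l.zip l.tail) : ab.1 ∈ l ∧ ab.2 ∈ l := by
  obtain ⟨x, y⟩ := ab
  obtain ⟨h1, h2⟩ := List.of_mem_zip h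
  exact ⟨h1, List.mem_of_mem_tail h2⟩

-- same-diagonal adjacent pairs of a diagonal-blocked concatenation are the blocks' adjacent pairs
theorem pv_mem_adj_flatten (C : (Int × Int) × (Int × Int) → Prop) :
    ∀ (L : List (List (Int × Int))),
      (∀ bl ∈ L, ∀ a ∈ bl, ∀ b ∈ bl, a.1 - a.2 = b.1 - b.2) →
      L.Pairwise (fun b₁ b₂ => ∀ a ∈ b₁, ∀ b ∈ b₂, a.1 - a.2 ≠ b.1 - b.2) →
      ((∃ ab ∈ L.flatten.zip L.flatten.tail, ab.1.1 - ab.1.2 = ab.2.1 - ab.2.2 ∧ C ab)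
        ↔ ∃ bl ∈ L, ∃ ab ∈ bl.zip bl.tail, C ab)
  | [], _, _ => by simp
  | bl :: L, H1, H2 => by
    have H1' : ∀ b ∈ L, ∀ a ∈ b, ∀ c ∈ b, a.1 - a.2 = c.1 - c.2 :=
      fun b hb => H1 b (List.mem_cons_of_mem _ hb)
    have IH := pv_mem_adj_flatten C L H1' (List.Pairwise.of_cons H2)
    rw [List.flatten_cons, pv_zip_tail_append]
    constructor
    · rintro ⟨ab, hab, hdg, hC⟩
      rcases List.mem_append.mp hab with h | h
      · exact ⟨bl, List.mem_cons_self .., ab, h, hC⟩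
      · rcases List.mem_append.mp h with h | h
        · exfalso
          rcases hL : bl.getLast? with _ | a
          · rw [hL] at h; simp at h
          rcases hH : L.flatten.head? with _ | b
          · rw [hL, hH] at h; simp at h
          rw [hL, hH] at h
          simp at h
          subst h
          have ha' : a ∈ bl := List.mem_of_getLast? hL
          have hb' : b ∈ L.flatten := List.mem_of_mem_head? (by simp [hH])
          obtain ⟨bl', hbl', hbmem⟩ := List.mem_flatten.mp hb'
          exact (List.rel_of_pairwise_cons H2 hbl') a ha' b hbmem hdg
        · obtain ⟨bl', hbl', rest⟩ := IH.mp ⟨ab, h, hdg, hC⟩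
          exact ⟨bl', List.mem_cons_of_mem _ hbl', rest⟩
    · rintro ⟨bl', hbl', ab, hab, hC⟩
      rcases List.mem_cons.mp hbl' with rfl | hbl'
      · have hm := pv_mem_zip_tail hab
        have hdg : ab.1.1 - ab.1.2 = ab.2.1 - ab.2.2 :=
          H1 bl' (List.mem_cons_self ..) ab.1 hm.1 ab.2 hm.2
        exact ⟨ab, List.mem_append.mpr (Or.inl hab), hdg, hC⟩
      · obtain ⟨ab', hmem, hdg, hC'⟩ := IH.mpr ⟨bl', hbl', ab, hab, hC⟩
        exact ⟨ab', List.mem_append.mpr (Or.inr (List.mem_append.mpr (Or.inr hmem))), hdg, hC'⟩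

theorem pv_mem_sortedBucket {seeds : List (Int × Int)} {d : Int} {x : Int × Int}
    (h : x ∈ PySem.List.sorted (seeds.filter (fun p => p.1 - p.2 == d)) pvKey1) :
    x ∈ seeds ∧ x.1 - x.2 = d := by
  rw [PySem.List.mem_sorted] at h
  have h' := List.mem_filter.mp h
  exact ⟨h'.1, by simpa using h'.2⟩

-- the globally key2-sorted list is the concatenation, by increasing diagonal, of the sorted buckets
theorem pv_ordered_decomp (seeds : List (Int × Int)) :
    PySem.List.sorted seeds pvKey2
      = ((PySem.List.sorted (PySem.Set.ofList (seeds.map (fun p => p.1 - p.2))) (fun x => x)).map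
          (fun d => PySem.List.sorted (seeds.filter (fun p => p.1 - p.2 == d)) pvKey1)).flatten := by
  rw [← pv_flatMap_eq_flatten]
  have hdSlt : (PySem.List.sorted (PySem.Set.ofList (seeds.map (fun p => p.1 - p.2))) (fun x => x)).Pairwise (· < ·) :=
    PySem.List.sorted_ofList_pairwise_lt _
  have hdSnd : (PySem.List.sorted (PySem.Set.ofList (seeds.map (fun p => p.1 - p.2))) (fun x => x)).Nodup :=
    hdSlt.imp (fun h => ne_of_lt h)
  have hcov : ∀ p ∈ seeds, p.1 - p.2 ∈ PySem.List.sorted (PySem.Set.ofList (seeds.map (fun p => p.1 - p.2))) (fun x => x) := by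
    intro p hp
    rw [PySem.List.mem_sorted, PySem.Set.mem_ofList]
    exact List.mem_map_of_mem hp
  have hperm1 := pv_perm_flatMap_filter (fun p => p.1 - p.2) _ seeds hdSnd hcov
  have hperm2 : ((PySem.List.sorted (PySem.Set.ofList (seeds.map (fun p => p.1 - p.2))) (fun x => x)).flatMap
        (fun d => seeds.filter (fun p => p.1 - p.2 == d))).Perm
      ((PySem.List.sorted (PySem.Set.ofList (seeds.map (fun p => p.1 - p.2))) (fun x => x)).flatMap
        (fun d => PySem.List.sorted (seeds.filter (fun p => p.1 - p.2 == d)) pvKey1)) :=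
    List.Perm.flatMap (List.Perm.refl _) (fun d _ => (PySem.List.sorted_perm _ _ _).symm)
  have hpw : ((PySem.List.sorted (PySem.Set.ofList (seeds.map (fun p => p.1 - p.2))) (fun x => x)).flatMap
      (fun d => PySem.List.sorted (seeds.filter (fun p => p.1 - p.2 == d)) pvKey1)).Pairwise
        (fun a b => pvKey2 a ≤ pvKey2 b) := by
    rw [List.pairwise_flatMap]
    constructor
    · intro d _
      have h1 := PySem.List.sorted_pairwise (seeds.filter (fun p => p.1 - p.2 == d)) pvKey1
      refine h1.imp_of_mem ?_
      intro a b ha hb hab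
      exact pv_key2_le_of_eq_diag
        ((pv_mem_sortedBucket ha).2.trans (pv_mem_sortedBucket hb).2.symm) (pv_key1_le_fst hab)
    · refine hdSlt.imp ?_
      intro d d' hlt a ha b hb
      refine pv_key2_le_of_diag_lt ?_
      rw [(pv_mem_sortedBucket ha).2, (pv_mem_sortedBucket hb).2]
      exact hlt
  calc PySem.List.sorted seeds pvKey2
      = PySem.List.sorted ((PySem.List.sorted (PySem.Set.ofList (seeds.map (fun p => p.1 - p.2))) (fun x => x)).flatMap
          (fun d => PySem.List.sorted (seeds.filter (fun p => p.1 - p.2 == d)) pvKey1)) pvKey2 :=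
        PySem.List.sorted_eq_sorted_of_perm _ _ pvKey2 pvKey2_inj (hperm1.trans hperm2)
    _ = _ := PySem.List.sorted_eq_self_of_pairwise _ _ hpw

-- what A's confirmed set contains
theorem pv_A_char (seeds : List (Int × Int)) (window : Int) (x : Int × Int) :
    (x ∈ (seeds.foldl (fun d p => d.modify (p.1 - p.2) [] (fun v => v ++ [p])) PySem.Dict.empty).values.foldl
        (fun conf hits =>
          (PySem.List.pyRange 1 (PySem.List.len (PySem.List.sorted hits pvKey1))).foldl (fun conf i =>
            if (PySem.List.pyGetD (PySem.List.sorted hits pvKey1) i (0, 0)).1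
                - (PySem.List.pyGetD (PySem.List.sorted hits pvKey1) (i - 1) (0, 0)).1 ≤ window then
              PySem.Set.add (PySem.Set.add conf (PySem.List.pyGetD (PySem.List.sorted hits pvKey1) (i - 1) (0, 0)))
                (PySem.List.pyGetD (PySem.List.sorted hits pvKey1) i (0, 0))
            else conf) conf) PySem.Set.empty
      ↔ ∃ d ∈ PySem.Set.ofList (seeds.map (fun p => p.1 - p.2)),
          ∃ ab ∈ (PySem.List.sorted (seeds.filter (fun p => p.1 - p.2 == d)) pvKey1).zip
              (PySem.List.sorted (seeds.filter (fun p => p.1 - p.2 == d)) pvKey1).tail,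
            ab.2.1 - ab.1.1 ≤ window ∧ (x = ab.1 ∨ x = ab.2)) := by
  have hkeys : (seeds.foldl (fun d p => d.modify (p.1 - p.2) [] (fun v => v ++ [p])) PySem.Dict.empty).keys
      = PySem.Set.ofList (seeds.map (fun p => p.1 - p.2)) := by
    have h := PySem.Dict.keys_foldl_modify_key seeds (fun p => p.1 - p.2) ([] : List (Int × Int))
      (fun _ p v => v ++ [p]) PySem.Dict.empty
    exact h.trans (PySem.Set.update_nil_left _)
  have hnd : (seeds.foldl (fun d p => d.modify (p.1 - p.2) [] (fun v => v ++ [p])) PySem.Dict.empty).keys.Nodup := by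
    rw [hkeys]; exact PySem.Set.nodup_ofList _
  have hgetD : ∀ c, (seeds.foldl (fun d p => d.modify (p.1 - p.2) [] (fun v => v ++ [p])) PySem.Dict.empty).getD c []
      = seeds.filter (fun p => p.1 - p.2 == c) := by
    intro c
    have h1 : seeds.foldl (fun d p => d.modify (p.1 - p.2) [] (fun v => v ++ [p])) PySem.Dict.empty
        = (seeds.map (fun p => (p.1 - p.2, p))).foldl (fun d q => d.modify q.1 [] (fun v => v ++ [q.2])) PySem.Dict.empty := by
      rw [List.foldl_map]
    rw [h1, PySem.Dict.getD_foldl_modify_append, List.filter_map, List.map_map]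
    simp [Function.comp_def]
  have hvals : (seeds.foldl (fun d p => d.modify (p.1 - p.2) [] (fun v => v ++ [p])) PySem.Dict.empty).values
      = (PySem.Set.ofList (seeds.map (fun p => p.1 - p.2))).map (fun d => seeds.filter (fun p => p.1 - p.2 == d)) := by
    rw [PySem.Dict.values_eq_map_keys _ hnd ([] : List (Int × Int)), hkeys]
    exact List.map_congr_left (fun d _ => hgetD d)
  refine Iff.trans (pv_mem_outer window _ PySem.Set.empty x) ?_
  rw [hvals]
  constructor
  · rintro (h | ⟨hits, hh, rest⟩)
    · exact absurd h (by simp [PySem.Set.empty_eq])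
    · obtain ⟨d, hd, rfl⟩ := List.mem_map.mp hh
      exact ⟨d, hd, rest⟩
  · rintro ⟨d, hd, rest⟩
    exact Or.inr ⟨_, List.mem_map.mpr ⟨d, hd, rfl⟩, rest⟩

-- what B's confirmed set contains (the same pairs)
theorem pv_B_char (seeds : List (Int × Int)) (window : Int) (x : Int × Int) :
    (x ∈ ((PySem.List.sorted seeds pvKey2).zip (PySem.List.sorted seeds pvKey2).tail).foldl
        (fun conf pc =>
          if pc.1.1 - pc.1.2 = pc.2.1 - pc.2.2 ∧ pc.2.1 - pc.1.1 ≤ window then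
            PySem.Set.add (PySem.Set.add conf pc.1) pc.2
          else conf) PySem.Set.empty
      ↔ ∃ d ∈ PySem.Set.ofList (seeds.map (fun p => p.1 - p.2)),
          ∃ ab ∈ (PySem.List.sorted (seeds.filter (fun p => p.1 - p.2 == d)) pvKey1).zip
              (PySem.List.sorted (seeds.filter (fun p => p.1 - p.2 == d)) pvKey1).tail,
            ab.2.1 - ab.1.1 ≤ window ∧ (x = ab.1 ∨ x = ab.2)) := by
  have hdSlt : (PySem.List.sorted (PySem.Set.ofList (seeds.map (fun p => p.1 - p.2))) (fun x => x)).Pairwise (· < ·) :=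
    PySem.List.sorted_ofList_pairwise_lt _
  have H1 : ∀ bl ∈ (PySem.List.sorted (PySem.Set.ofList (seeds.map (fun p => p.1 - p.2))) (fun x => x)).map
      (fun d => PySem.List.sorted (seeds.filter (fun p => p.1 - p.2 == d)) pvKey1),
      ∀ a ∈ bl, ∀ b ∈ bl, a.1 - a.2 = b.1 - b.2 := by
    intro bl hbl
    obtain ⟨d, _, rfl⟩ := List.mem_map.mp hbl
    intro a ha b hb
    rw [(pv_mem_sortedBucket ha).2, (pv_mem_sortedBucket hb).2]
  have H2 : ((PySem.List.sorted (PySem.Set.ofList (seeds.map (fun p => p.1 - p.2))) (fun x => x)).map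
      (fun d => PySem.List.sorted (seeds.filter (fun p => p.1 - p.2 == d)) pvKey1)).Pairwise
        (fun b₁ b₂ => ∀ a ∈ b₁, ∀ b ∈ b₂, a.1 - a.2 ≠ b.1 - b.2) := by
    rw [List.pairwise_map]
    refine hdSlt.imp ?_
    intro d d' hlt a ha b hb
    rw [(pv_mem_sortedBucket ha).2, (pv_mem_sortedBucket hb).2]
    exact ne_of_lt hlt
  have hadj := pv_mem_adj_flatten (fun ab => ab.2.1 - ab.1.1 ≤ window ∧ (x = ab.1 ∨ x = ab.2)) _ H1 H2
  refine Iff.trans (pv_mem_pairFold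
    (fun pc => pc.1.1 - pc.1.2 = pc.2.1 - pc.2.2 ∧ pc.2.1 - pc.1.1 ≤ window) _ PySem.Set.empty x) ?_
  rw [pv_ordered_decomp seeds]
  constructor
  · rintro (h | ⟨ab, hab, ⟨hdg, hw⟩, hx⟩)
    · exact absurd h (by simp [PySem.Set.empty_eq])
    · obtain ⟨bl, hbl, ab', hab', hC⟩ := hadj.mp ⟨ab, hab, hdg, hw, hx⟩
      obtain ⟨d, hd, rfl⟩ := List.mem_map.mp hbl
      rw [PySem.List.mem_sorted] at hd
      exact ⟨d, hd, ab', hab', hC⟩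
  · rintro ⟨d, hd, ab, hab, hC⟩
    have hd' : d ∈ PySem.List.sorted (PySem.Set.ofList (seeds.map (fun p => p.1 - p.2))) (fun x => x) := by
      rw [PySem.List.mem_sorted]; exact hd
    obtain ⟨ab', hab', hdg, hw, hx⟩ := hadj.mpr
      ⟨_, List.mem_map.mpr ⟨d, hd', rfl⟩, ab, hab, hC⟩
    exact Or.inr ⟨ab', hab', ⟨hdg, hw⟩, hx⟩

-- ===== VERDICT (by name: the statement is the Claim_ definition above) =====
theorem filter_seeds_two_hit_spec : Claim_equal_filter_seeds_two_hit := by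
  intro seeds window _
  show filter_seeds_two_hit seeds window = filter_seeds_two_hit_alt seeds window
  by_cases hseeds : seeds = []
  · subst hseeds; rfl
  · simp only [filter_seeds_two_hit, filter_seeds_two_hit_alt, if_neg hseeds]
    refine PySem.List.sorted_eq_sorted_of_perm _ _ pvKey1 pvKey1_inj ?_
    have hAnd := pv_nodup_outer window
      ((seeds.foldl (fun d p => d.modify (p.1 - p.2) [] (fun v => v ++ [p])) PySem.Dict.empty).values)
      PySem.Set.empty List.nodup_nil
    have hBnd := pv_nodup_pairFold
      (fun pc => pc.1.1 - pc.1.2 = pc.2.1 - pc.2.2 ∧ pc.2.1 - pc.1.1 ≤ window)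
      ((PySem.List.sorted seeds pvKey2).zip (PySem.List.sorted seeds pvKey2).tail)
      PySem.Set.empty List.nodup_nil
    rw [List.perm_ext_iff_of_nodup hAnd hBnd]
    intro x
    exact (pv_A_char seeds window x).trans (pv_B_char seeds window x).symm
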